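-- pv_equiv track=rewrite | github.com/blackjackal982/Mission-RND | mocktest_problem2.py | board_gen
-- ===== SOURCE A (Python) =====
-- def board_gen(board):
--     board.reverse()
--     li = []
--     for i in range(len(board)):
--         li.append((board[i],i))
--     col = len(board)
--     row = col
--     matrix = []
--     for i in range(row):
--          mat = []
--          for j in range(col):
--             if (i,j) in li:
--                 mat.append('Q')
--             else:
--                 mat.append('_')
--          matrix.append(mat)
--     return matrix
-- ===== SOURCE B (Python) =====
-- def board_gen(board):
--     board.reverse()
--     n = len(board)
--     matrix = [['_'] * n for _ in range(n)]
--     for j, v in enumerate(board):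
--         if 0 <= v < n:
--             matrix[v][j] = 'Q'
--     return matrix
-- ===== Notes on version B (the rewrite author's own statement) =====
-- stated objective: faster
-- what changed: Replaces the membership scan of a (value,index) pair list for every grid cell with one direct-placement pass: prefill an n x n '_' grid and set matrix[v][j]='Q' for each column j whose value v is in range.
import Mathlib
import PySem

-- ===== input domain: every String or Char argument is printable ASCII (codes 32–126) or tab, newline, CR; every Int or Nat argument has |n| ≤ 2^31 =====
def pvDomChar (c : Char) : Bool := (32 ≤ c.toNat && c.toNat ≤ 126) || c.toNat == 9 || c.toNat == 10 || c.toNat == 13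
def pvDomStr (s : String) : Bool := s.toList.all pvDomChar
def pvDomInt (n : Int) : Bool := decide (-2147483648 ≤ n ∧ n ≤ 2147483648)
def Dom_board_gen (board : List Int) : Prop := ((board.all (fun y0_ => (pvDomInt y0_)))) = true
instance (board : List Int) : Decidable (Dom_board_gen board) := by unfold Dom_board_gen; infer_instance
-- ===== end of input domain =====

-- B builds the board by one direct-placement pass instead of scanning a pair list for every cell.
-- Equivalence is about the RETURN value; both Pythons also reverse `board` in place identically.

-- ===== PORT A =====
def board_gen (board : List Int) : List (List String) :=
  let b := board.reverse
  let li := (List.range b.length).map (fun (i : Nat) => (b.getD i 0, (i : Int)))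
  (List.range b.length).map (fun (i : Nat) =>
    (List.range b.length).map (fun (j : Nat) =>
      if ((i : Int), (j : Int)) ∈ li then "Q" else "_"))

-- ===== PORT B =====
-- one placement step of B's loop body: matrix[v][j] = 'Q' when 0 <= v < n
def bstep (n : Nat) (m : List (List String)) (p : Int × Nat) : List (List String) :=
  if 0 ≤ p.1 ∧ p.1 < (n : Int) then m.set p.1.toNat ((m.getD p.1.toNat []).set p.2 "Q") else m

def board_gen_alt (board : List Int) : List (List String) :=
  let b := board.reverse
  let n := b.length
  let init := (List.range n).map (fun _ => List.replicate n "_")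
  b.zipIdx.foldl (bstep n) init

-- ===== PRECONDITION & SPEC =====
def Spec_board_gen (board : List Int) (out : List (List String)) : Prop := out = board_gen_alt board
instance (board : List Int) (out : List (List String)) : Decidable (Spec_board_gen board out) := by unfold Spec_board_gen; infer_instance

-- ===== CLAIM (what is proved, stated in full; the proofs are below) =====
def Claim_equal_board_gen : Prop := ∀ (board : List Int), Dom_board_gen board → Spec_board_gen board (board_gen board)

-- ===== LEMMAS AND PROOFS =====

theorem getD_set {α : Type} (l : List α) (k : Nat) (a : α) (i : Nat) (d : α) :
    (l.set k a).getD i d = if i = k ∧ k < l.length then a else l.getD i d := by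
  simp only [List.getD, List.getElem?_set]
  split_ifs with h1 h2 h3 <;> simp_all

def BInv (n : Nat) (m : List (List String)) : Prop :=
  m.length = n ∧ ∀ r ∈ m, r.length = n

theorem bstep_inv (n : Nat) (m : List (List String)) (p : Int × Nat)
    (h : BInv n m) : BInv n (bstep n m p) := by
  obtain ⟨hl, hr⟩ := h
  unfold bstep
  split
  · rename_i hp
    constructor
    · simpa using hl
    · intro r hrm
      rcases List.mem_or_eq_of_mem_set hrm with hmem | heq
      · exact hr r hmem
      · subst heq
        rw [List.length_set]
        have hv : p.1.toNat < m.length := by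
          rcases hp with ⟨h0, h1⟩; omega
        rw [List.getD_eq_getElem _ _ hv]
        exact hr _ (List.getElem_mem hv)
  · exact ⟨hl, hr⟩

theorem foldl_inv (n : Nat) (l : List (Int × Nat)) (m : List (List String))
    (h : BInv n m) : BInv n (l.foldl (bstep n) m) := by
  induction l generalizing m with
  | nil => exact h
  | cons p t ih => exact ih _ (bstep_inv n m p h)

theorem bstep_get (n : Nat) (m : List (List String)) (v : Int) (t : Nat)
    (hm : BInv n m) (i j : Nat) (hi : i < n) (hj : j < n) :
    ((bstep n m (v, t)).getD i []).getD j "_" =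
      if j = t ∧ v = (i : Int) then "Q" else (m.getD i []).getD j "_" := by
  obtain ⟨hl, hr⟩ := hm
  unfold bstep
  by_cases hv : 0 ≤ v ∧ v < (n : Int)
  · rw [if_pos hv]
    simp only
    rw [getD_set]
    by_cases hiv : i = v.toNat ∧ v.toNat < m.length
    · rw [if_pos hiv]
      have hlen : (m.getD v.toNat []).length = n := by
        rw [List.getD_eq_getElem _ _ hiv.2]; exact hr _ (List.getElem_mem hiv.2)
      rw [getD_set]
      have hvi : v = (i : Int) := by omega
      by_cases hjt : j = t
      · rw [if_pos ⟨hjt, by rw [hlen]; omega⟩, if_pos ⟨hjt, hvi⟩]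
      · rw [if_neg (fun h => hjt h.1), if_neg (fun h => hjt h.1), hiv.1]
    · rw [if_neg hiv]
      have : ¬ (v = (i : Int)) := by omega
      simp [this]
  · rw [if_neg hv]
    have : ¬ (v = (i : Int)) := by omega
    simp [this]

theorem fold_char (n : Nat) (bs : List Int) : ∀ (t : Nat) (m : List (List String)),
    BInv n m → ∀ i j, i < n → j < n →
    (((bs.zipIdx t).foldl (bstep n) m).getD i []).getD j "_" =
      if t ≤ j ∧ j - t < bs.length ∧ bs.getD (j - t) 0 = (i : Int)
      then "Q" else (m.getD i []).getD j "_" := by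
  induction bs with
  | nil => intro t m _ i j _ _; simp
  | cons v rest ih =>
    intro t m hm i j hi hj
    rw [List.zipIdx_cons, List.foldl_cons]
    rw [ih (t + 1) (bstep n m (v, t)) (bstep_inv n m (v, t) hm) i j hi hj]
    rw [bstep_get n m v t hm i j hi hj]
    rcases Nat.lt_trichotomy j t with hlt | heq | hgt
    · have h1 : ¬ (t + 1 ≤ j) := by omega
      have h2 : ¬ (j = t) := by omega
      have h3 : ¬ (t ≤ j) := by omega
      simp [h1, h2, h3]
    · subst heq
      have h1 : ¬ (j + 1 ≤ j) := by omega
      simp only [h1, false_and, if_false, Nat.sub_self, List.getD_cons_zero,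
        List.length_cons, le_refl, true_and]
      split_ifs with h2 h3 h3 <;> first
        | rfl
        | (exfalso; omega)
    · have h2 : ¬ (j = t) := by omega
      have hsub : j - t = (j - (t + 1)) + 1 := by omega
      rw [hsub, List.getD_cons_succ]
      simp only [h2, false_and, if_false, List.length_cons]
      split_ifs with h3 h4 h4 <;> first
        | rfl
        | (exfalso; omega)

theorem init_inv (n : Nat) :
    BInv n ((List.range n).map (fun _ => List.replicate n "_")) := by
  constructor
  · simp
  · intro r hr
    simp only [List.mem_map] at hr
    obtain ⟨_, _, rfl⟩ := hr
    simp

theorem board_gen_alt_eq (board : List Int) :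
    board_gen_alt board =
      (List.range board.length).map (fun (i : Nat) =>
        (List.range board.length).map (fun (j : Nat) =>
          if board.reverse.getD j 0 = (i : Int) then "Q" else "_")) := by
  unfold board_gen_alt
  simp only [List.length_reverse]
  have hinv := foldl_inv board.length (board.reverse.zipIdx)
    ((List.range board.length).map (fun _ => List.replicate board.length "_"))
    (init_inv board.length)
  apply List.ext_getElem
  · rw [hinv.1]; simp
  · intro i h1 h2
    have hi : i < board.length := by rw [hinv.1] at h1; exact h1
    have hrowlen : (board.reverse.zipIdx.foldl (bstep board.length)
        ((List.range board.length).map (fun _ => List.replicate board.length "_")))[i].length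
        = board.length := hinv.2 _ (List.getElem_mem h1)
    apply List.ext_getElem
    · rw [hrowlen]; simp
    · intro j h3 h4
      have hj : j < board.length := by rw [hrowlen] at h3; exact h3
      have key := fold_char board.length board.reverse 0
        ((List.range board.length).map (fun _ => List.replicate board.length "_"))
        (init_inv board.length) i j hi hj
      rw [List.getD_eq_getElem _ _ h1, List.getD_eq_getElem _ _ h3] at key
      rw [key]
      have hinit : ((((List.range board.length).map
          (fun _ => List.replicate board.length "_")).getD i []).getD j "_") = "_" := by
        simp [List.getD, hi, hj]
      rw [hinit]
      simp only [Nat.zero_le, true_and, Nat.sub_zero, List.length_reverse]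
      simp [hj]

theorem mem_li (b : List Int) (i j : Nat) (hj : j < b.length) :
    (((i : Int), (j : Int)) ∈ (List.range b.length).map (fun (k : Nat) => (b.reverse.getD k 0, (k : Int)))) ↔
      b.reverse.getD j 0 = (i : Int) := by
  simp only [List.mem_map, List.mem_range, Prod.mk.injEq]
  constructor
  · rintro ⟨k, hk, hv, hkj⟩
    have : k = j := by exact_mod_cast hkj
    subst this; exact hv
  · intro h; exact ⟨j, hj, h, rfl⟩

-- ===== VERDICT (by name: the statement is the Claim_ definition above) =====
theorem board_gen_eq (board : List Int) :
    board_gen board =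
      (List.range board.length).map (fun (i : Nat) =>
        (List.range board.length).map (fun (j : Nat) =>
          if board.reverse.getD j 0 = (i : Int) then "Q" else "_")) := by
  unfold board_gen
  simp only [List.length_reverse]
  apply List.map_congr_left
  intro i hi
  apply List.map_congr_left
  intro j hj
  simp only [mem_li board i j (by simpa using hj)]

theorem board_gen_spec : Claim_equal_board_gen := by
  intro board _
  show board_gen board = board_gen_alt board
  rw [board_gen_alt_eq, board_gen_eq]
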